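-- pv_equiv track=rewrite | github.com/ssu-csec/improved-lbc | core.py | gen_global
-- ===== SOURCE A (Python) =====
-- one_block_len = 14
--
-- def gen_global(str_len):
-- 	global_str = []
-- 	left_len = str_len
-- 	while left_len > one_block_len:
-- 		global_str.append(one_block_len)
-- 		left_len -= one_block_len
-- 	global_str.append(left_len)
-- 	return global_str
-- ===== SOURCE B (Python) =====
-- one_block_len = 14
--
-- def gen_global(str_len):
--     # Closed form: q full blocks of 14 plus remainder, no loop.
--     if str_len <= one_block_len:
--         return [str_len]
--     q, r = divmod(str_len, one_block_len)
--     return [one_block_len] * q if r == 0 else [one_block_len] * q + [r]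
-- ===== Notes on version B (the rewrite author's own statement) =====
-- stated objective: simpler
-- what changed: Replaced the decrement-by-14 loop with a closed-form divmod computation building the block list directly.
import Mathlib
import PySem

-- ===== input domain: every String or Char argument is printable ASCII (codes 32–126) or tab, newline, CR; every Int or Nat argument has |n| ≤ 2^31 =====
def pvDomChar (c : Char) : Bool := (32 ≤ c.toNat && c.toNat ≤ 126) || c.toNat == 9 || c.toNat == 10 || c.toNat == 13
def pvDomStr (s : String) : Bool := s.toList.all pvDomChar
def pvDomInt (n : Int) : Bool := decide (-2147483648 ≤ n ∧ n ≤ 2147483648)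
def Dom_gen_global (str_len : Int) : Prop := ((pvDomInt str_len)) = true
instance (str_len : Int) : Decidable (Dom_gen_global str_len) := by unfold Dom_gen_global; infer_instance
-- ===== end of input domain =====

-- B replaces A's decrement-by-14 loop with a closed-form divmod computation (objective: simpler).

-- ===== PORT A =====
-- while left_len > 14: append 14; left_len -= 14; then append left_len
def genGlobalLoop (left : Int) (acc : List Int) : List Int :=
  if 14 < left then genGlobalLoop (left - 14) (acc ++ [14]) else acc ++ [left]
termination_by left.toNat
decreasing_by omega

def gen_global (str_len : Int) : List Int := genGlobalLoop str_len []

-- ===== PORT B =====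
def gen_global_alt (str_len : Int) : List Int :=
  if str_len ≤ 14 then [str_len]
  else
    let q := PySem.Int.floordiv str_len 14
    let r := PySem.Int.mod str_len 14
    if r = 0 then List.replicate q.toNat 14 else List.replicate q.toNat 14 ++ [r]

-- ===== PRECONDITION & SPEC =====
def Spec_gen_global (str_len : Int) (out : List Int) : Prop := out = gen_global_alt str_len
instance (str_len : Int) (out : List Int) : Decidable (Spec_gen_global str_len out) := by unfold Spec_gen_global; infer_instance

-- ===== CLAIM (what is proved, stated in full; the proofs are below) =====
def Claim_equal_gen_global : Prop := ∀ (str_len : Int), Dom_gen_global str_len → Spec_gen_global str_len (gen_global str_len)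

-- ===== LEMMAS AND PROOFS =====

-- One peel of the closed form above the guard.
theorem alt_step (n : Int) (h : 14 < n) :
    gen_global_alt n = 14 :: gen_global_alt (n - 14) := by
  unfold gen_global_alt
  rw [PySem.Int.floordiv_eq_ediv_of_pos (by norm_num),
      PySem.Int.mod_eq_emod_of_pos (by norm_num),
      PySem.Int.floordiv_eq_ediv_of_pos (by norm_num),
      PySem.Int.mod_eq_emod_of_pos (by norm_num)]
  rw [if_neg (by omega)]
  by_cases h2 : n - 14 ≤ 14
  · rw [if_pos h2]
    by_cases hr : n % 14 = 0
    · have hn : n = 28 := by omega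
      subst hn; decide
    · rw [if_neg hr]
      have hq : (n / 14).toNat = 1 := by omega
      have hrv : n % 14 = n - 14 := by omega
      rw [hq, hrv]; rfl
  · rw [if_neg h2]
    have hmod : n % 14 = (n - 14) % 14 := by omega
    have hq : (n / 14).toNat = ((n - 14) / 14).toNat + 1 := by omega
    by_cases hr : n % 14 = 0
    · rw [if_pos hr, if_pos (by omega : (n - 14) % 14 = 0), hq, List.replicate_succ]
    · rw [if_neg hr, if_neg (by omega : ¬ (n - 14) % 14 = 0), hq, hmod,
          List.replicate_succ, List.cons_append]

theorem loop_eq (left : Int) (acc : List Int) :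
    genGlobalLoop left acc = acc ++ gen_global_alt left := by
  by_cases h : 14 < left
  · rw [genGlobalLoop, if_pos h, loop_eq (left - 14), alt_step left h]
    simp
  · rw [genGlobalLoop, if_neg h]
    unfold gen_global_alt
    rw [if_pos (by omega)]
termination_by left.toNat
decreasing_by omega

-- ===== VERDICT (by name: the statement is the Claim_ definition above) =====
theorem gen_global_spec : Claim_equal_gen_global := by
  intro n _
  unfold Spec_gen_global gen_global
  rw [loop_eq]
  rfl
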